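-- pv_equiv track=rewrite | github.com/muhammed-ayman/codeforces-solutions | 1373B/main.py | who_wins
-- ===== SOURCE A (Python) =====
-- def who_wins(play_str):
--
--     lose = 0
--     counter = 1
--
--     while counter > 0:
--         if (lose == 1) or (len(play_str) == 0):
--             break
--         for i in range(len(play_str)):
--             if i == (len(play_str) - 1):
--                 lose = 1
--                 counter += 1
--                 continue
--             if play_str[i] != play_str[i+1]:
--                 play_str = play_str[:i] + play_str[i+2:]
--                 break
--         counter += 1
--
--     if (counter%2 == 0):
--         return 'DA'
--     else:
--         return 'NET'
-- ===== SOURCE B (Python) =====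
-- def who_wins(play_str):
--     ch = ''
--     cnt = 0
--     removals = 0
--     for c in play_str:
--         if cnt > 0 and c != ch:
--             cnt -= 1
--             removals += 1
--         elif cnt == 0:
--             ch = c
--             cnt = 1
--         else:
--             cnt += 1
--     return 'DA' if removals % 2 == 1 else 'NET'
-- ===== Notes on version B (the rewrite author's own statement) =====
-- stated objective: faster
-- what changed: Replaced A's repeated rescan-and-splice of the leftmost differing adjacent pair (a while loop rebuilding the string each removal) by a single left-to-right pass keeping only the current run's character, its length and a removal counter, deciding the winner by the parity of removals.
import Mathlib
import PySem

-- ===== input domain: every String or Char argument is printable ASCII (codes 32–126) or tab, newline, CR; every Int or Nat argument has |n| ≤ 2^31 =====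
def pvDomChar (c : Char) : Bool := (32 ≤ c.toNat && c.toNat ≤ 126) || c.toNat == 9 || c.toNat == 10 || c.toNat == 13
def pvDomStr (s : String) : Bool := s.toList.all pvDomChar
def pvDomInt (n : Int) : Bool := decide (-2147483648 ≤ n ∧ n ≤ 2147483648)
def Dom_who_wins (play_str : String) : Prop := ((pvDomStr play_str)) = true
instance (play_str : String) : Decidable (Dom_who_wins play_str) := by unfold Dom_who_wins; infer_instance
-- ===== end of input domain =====

-- B replaces A's repeated leftmost-pair scan-and-remove (quadratic) by one stack-style pass
-- counting removals and deciding by their parity; the equivalence of the two is proved below.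

-- ===== PORT A =====
-- A's inner `for i in range(len(play_str))` loop: returns (play_str, lose, counter) at break / loop end.
def whoWinsFor (s : List Char) (i : Nat) (lose counter : Int) : List Char × Int × Int :=
  if _h : i < s.length then
    if i = s.length - 1 then
      -- lose = 1; counter += 1; continue
      whoWinsFor s (i + 1) 1 (counter + 1)
    else if s.getD i ' ' ≠ s.getD (i + 1) ' ' then
      -- play_str = play_str[:i] + play_str[i+2:]; break
      (PySem.List.slice s none (some (i : Int)) ++ PySem.List.slice s (some ((i : Int) + 2)) none,
       lose, counter)
    else
      whoWinsFor s (i + 1) lose counter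
  else (s, lose, counter)
termination_by s.length - i

-- A's `while counter > 0` loop; fuel only makes it total (each pass removes two chars or sets lose,
-- so `length + 2` steps always suffice — proved in the lemmas below).
def whoWinsWhile (fuel : Nat) (s : List Char) (lose counter : Int) : Int :=
  match fuel with
  | 0 => counter
  | f + 1 =>
    if lose = 1 ∨ s.length = 0 then counter
    else
      let r := whoWinsFor s 0 lose counter
      whoWinsWhile f r.1 r.2.1 (r.2.2 + 1)

def who_wins (play_str : String) : String :=
  let c := whoWinsWhile (play_str.toList.length + 2) play_str.toList 0 1
  if PySem.Int.mod c 2 = 0 then "DA" else "NET"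

-- ===== PORT B =====
-- one step of B's single pass: state = (current run char, run length, removals so far)
def altStep (st : Char × Nat × Nat) (c : Char) : Char × Nat × Nat :=
  if st.2.1 > 0 ∧ c ≠ st.1 then (st.1, st.2.1 - 1, st.2.2 + 1)
  else if st.2.1 = 0 then (c, 1, st.2.2)
  else (st.1, st.2.1 + 1, st.2.2)

def who_wins_alt (play_str : String) : String :=
  let st := play_str.toList.foldl altStep (' ', 0, 0)
  if st.2.2 % 2 = 1 then "DA" else "NET"

-- ===== PRECONDITION & SPEC =====
def Spec_who_wins (play_str : String) (out : String) : Prop := out = who_wins_alt play_str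
instance (play_str : String) (out : String) : Decidable (Spec_who_wins play_str out) := by unfold Spec_who_wins; infer_instance

-- ===== CLAIM (what is proved, stated in full; the proofs are below) =====
def Claim_equal_who_wins : Prop := ∀ (play_str : String), Dom_who_wins play_str → Spec_who_wins play_str (who_wins play_str)

-- ===== LEMMAS AND PROOFS =====

-- number of removals B counts
def remCount (s : List Char) : Nat := (s.foldl altStep (' ', 0, 0)).2.2

lemma altStep_pop {cnt : Nat} {c ch : Char} (h : 0 < cnt) (hc : c ≠ ch) (r : Nat) :
    altStep (ch, cnt, r) c = (ch, cnt - 1, r + 1) := by simp [altStep, h, hc]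
lemma altStep_new (ch c : Char) (r : Nat) : altStep (ch, 0, r) c = (c, 1, r) := by
  simp [altStep]
lemma altStep_push (ch : Char) (cnt r : Nat) :
    altStep (ch, cnt, r) ch = (ch, cnt + 1, r) := by simp [altStep]

lemma foldl_shift (l : List Char) : ∀ ch cnt r,
    l.foldl altStep (ch, cnt, r) =
    ((l.foldl altStep (ch, cnt, 0)).1, (l.foldl altStep (ch, cnt, 0)).2.1,
      (l.foldl altStep (ch, cnt, 0)).2.2 + r) := by
  induction l with
  | nil => intro ch cnt r; simp
  | cons c t ih =>
    intro ch cnt r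
    simp only [List.foldl_cons]
    rcases Nat.eq_zero_or_pos cnt with h0 | hpos
    · subst h0
      rw [altStep_new, altStep_new, ih c 1 r]
    · by_cases hc : c = ch
      · subst hc
        rw [altStep_push c cnt r, altStep_push c cnt 0, ih c (cnt + 1) r]
      · rw [altStep_pop hpos hc, altStep_pop hpos hc, ih ch (cnt - 1) (r + 1),
          ih ch (cnt - 1) (0 + 1)]
        simp only [Prod.mk.injEq, true_and]
        omega

lemma foldl_rem_ch_irrel (l : List Char) (ch ch' : Char) (r : Nat) :
    (l.foldl altStep (ch, 0, r)).2.2 = (l.foldl altStep (ch', 0, r)).2.2 := by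
  cases l with
  | nil => rfl
  | cons c t => simp only [List.foldl_cons, altStep_new]

lemma foldl_replicate_pos (a : Char) : ∀ (n m : Nat) (r : Nat), 0 < m →
    (List.replicate n a).foldl altStep (a, m, r) = (a, m + n, r) := by
  intro n
  induction n with
  | zero => intro m r _; simp
  | succ k ih =>
    intro m r hm
    rw [List.replicate_succ, List.foldl_cons, altStep_push a m r, ih (m + 1) r (by omega)]
    simp only [Prod.mk.injEq, true_and, and_true]
    omega

lemma foldl_replicate_init (n : Nat) (a ch : Char) (r : Nat) :
    (List.replicate n a).foldl altStep (ch, 0, r) =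
      if n = 0 then (ch, 0, r) else (a, n, r) := by
  cases n with
  | zero => simp
  | succ k =>
    rw [List.replicate_succ, List.foldl_cons, altStep_new,
      foldl_replicate_pos a k 1 r (by omega)]
    simp only [Nat.succ_ne_zero, if_false, Prod.mk.injEq, true_and, and_true]
    omega


lemma remCount_replicate (n : Nat) (a : Char) : remCount (List.replicate n a) = 0 := by
  unfold remCount
  rw [foldl_replicate_init]
  split_ifs <;> rfl

lemma remCount_step (j : Nat) (a b : Char) (t : List Char) (hb : b ≠ a) :
    remCount (List.replicate (j + 1) a ++ b :: t) = remCount (List.replicate j a ++ t) + 1 := by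
  unfold remCount
  rw [List.foldl_append, List.foldl_append, foldl_replicate_init, foldl_replicate_init]
  simp only [Nat.succ_ne_zero, if_false]
  rw [List.foldl_cons, altStep_pop (by omega) hb]
  cases j with
  | zero =>
    rw [show (1 : Nat) - 1 = 0 from rfl, foldl_rem_ch_irrel t a ' ' (0 + 1),
      foldl_shift t ' ' 0 (0 + 1)]
    simp
  | succ k =>
    simp only [Nat.succ_ne_zero, if_false]
    rw [show k + 1 + 1 - 1 = k + 1 from rfl, foldl_shift t a (k + 1) (0 + 1),
      foldl_shift t a (k + 1) 0]

lemma decomp (s : List Char) :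
    s = [] ∨ (∃ n a, n ≠ 0 ∧ s = List.replicate n a) ∨
      (∃ j a b t, b ≠ a ∧ s = List.replicate (j + 1) a ++ b :: t) := by
  induction s with
  | nil => exact Or.inl rfl
  | cons c rest ih =>
    right
    rcases ih with h | ⟨n, a, hn, h⟩ | ⟨j, a, b, t, hb, h⟩
    · exact Or.inl ⟨1, c, one_ne_zero, by rw [h]; rfl⟩
    · by_cases hca : a = c
      · subst hca h
        exact Or.inl ⟨n + 1, a, by omega, by simp [List.replicate_succ]⟩
      · subst h
        cases n with
        | zero => omega
        | succ m =>
          exact Or.inr ⟨0, c, a, List.replicate m a, fun e => hca e,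
            by simp [List.replicate_succ]⟩
    · subst h
      by_cases hca : a = c
      · subst hca
        exact Or.inr ⟨j + 1, a, b, t, hb, by simp [List.replicate_succ]⟩
      · exact Or.inr ⟨0, c, a, List.replicate j a ++ b :: t, fun e => hca e,
          by simp [List.replicate_succ]⟩

lemma forA_uniform (n : Nat) (a : Char) : ∀ (i : Nat) (lose c : Int), i < n →
    whoWinsFor (List.replicate n a) i lose c = (List.replicate n a, 1, c + 1) := by
  have key : ∀ (k i : Nat) (lose c : Int), n - i ≤ k → i < n →
      whoWinsFor (List.replicate n a) i lose c = (List.replicate n a, 1, c + 1) := by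
    intro k
    induction k with
    | zero => intro i lose c hk hi; omega
    | succ k ih =>
      intro i lose c hk hi
      rw [whoWinsFor]
      rw [dif_pos (by simpa using hi)]
      by_cases hlast : i = (List.replicate n a).length - 1
      · rw [if_pos hlast]
        rw [whoWinsFor, dif_neg (by simp at hlast ⊢; omega)]
      · rw [if_neg hlast]
        have hgd : ∀ m : Nat, m < n → (List.replicate n a).getD m ' ' = a := by
          intro m hm
          rw [List.getD_eq_getElem?_getD]
          simp [hm]
        have hi1 : i + 1 < n := by simp at hlast; omega
        rw [if_neg (by rw [hgd i hi, hgd (i + 1) hi1]; simp)]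
        exact ih (i + 1) lose c (by omega) hi1
  intro i lose c hi
  exact key (n - i) i lose c le_rfl hi

lemma forA_getD_a (j : Nat) (a b : Char) (t : List Char) (m : Nat) (hm : m ≤ j) :
    (List.replicate (j + 1) a ++ b :: t).getD m ' ' = a := by
  rw [List.getD_eq_getElem?_getD, List.getElem?_append_left (by simp; omega)]
  simp [hm]

lemma forA_getD_b (j : Nat) (a b : Char) (t : List Char) :
    (List.replicate (j + 1) a ++ b :: t).getD (j + 1) ' ' = b := by
  rw [List.getD_eq_getElem?_getD, List.getElem?_append_right (by simp)]
  simp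

lemma forA_body_at_j (j : Nat) (a b : Char) (t : List Char) (hb : b ≠ a)
    (lose c : Int) :
    whoWinsFor (List.replicate (j + 1) a ++ b :: t) j lose c =
      (List.replicate j a ++ t, lose, c) := by
  rw [whoWinsFor, dif_pos (by simp; omega), if_neg (by simp; omega),
    if_pos (by rw [forA_getD_a j a b t j le_rfl, forA_getD_b]; exact fun e => hb e.symm)]
  have h1 : PySem.List.slice (List.replicate (j + 1) a ++ b :: t) none (some (j : Int)) =
      List.replicate j a := by
    rw [PySem.List.slice_to_natCast, List.take_append_of_le_length (by simp),
      List.take_replicate]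
    congr 1
    omega
  have h2 : PySem.List.slice (List.replicate (j + 1) a ++ b :: t) (some ((j : Int) + 2)) none =
      t := by
    rw [show ((j : Int) + 2) = ((j + 2 : Nat) : Int) by push_cast; ring,
      PySem.List.slice_from_natCast,
      show j + 2 = (List.replicate (j + 1) a).length + 1 by simp, List.drop_append]
    simp
  rw [h1, h2]

lemma forA_remove (j : Nat) (a b : Char) (t : List Char) (hb : b ≠ a) :
    ∀ (i : Nat) (lose c : Int), i ≤ j →
    whoWinsFor (List.replicate (j + 1) a ++ b :: t) i lose c =
      (List.replicate j a ++ t, lose, c) := by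
  have key : ∀ (k i : Nat) (lose c : Int), j - i ≤ k → i ≤ j →
      whoWinsFor (List.replicate (j + 1) a ++ b :: t) i lose c =
        (List.replicate j a ++ t, lose, c) := by
    intro k
    induction k with
    | zero =>
      intro i lose c hk hi
      have hij : i = j := by omega
      subst hij
      exact forA_body_at_j i a b t hb lose c
    | succ k ih =>
      intro i lose c hk hi
      rcases Nat.eq_or_lt_of_le hi with hij | hij
      · subst hij
        exact forA_body_at_j i a b t hb lose c
      · rw [whoWinsFor, dif_pos (by simp; omega), if_neg (by simp; omega),
          if_neg (by rw [forA_getD_a j a b t i (by omega),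
            forA_getD_a j a b t (i + 1) (by omega)]; simp)]
        exact ih (i + 1) lose c (by omega) (by omega)
  intro i lose c hi
  exact key (j - i) i lose c le_rfl hi

lemma whileA_eq : ∀ (fuel : Nat) (s : List Char) (c : Int), s.length + 2 ≤ fuel →
    whoWinsWhile fuel s 0 c =
      c + (remCount s : Int) + (if 2 * remCount s = s.length then 0 else 2) := by
  intro fuel
  induction fuel with
  | zero => intro s c h; omega
  | succ f ih =>
    intro s c h
    rcases decomp s with hs | ⟨n, a, hn, hs⟩ | ⟨j, a, b, t, hb, hs⟩
    · subst hs
      simp [whoWinsWhile, remCount]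
    · subst hs
      rw [whoWinsWhile]
      rw [if_neg (by simp [hn])]
      simp only [forA_uniform n a 0 0 c (by omega)]
      have hf : ∃ f', f = f' + 1 := by
        simp at h; exact ⟨f - 1, by omega⟩
      obtain ⟨f', rfl⟩ := hf
      rw [whoWinsWhile, if_pos (Or.inl rfl)]
      rw [remCount_replicate]
      rw [if_neg (by simp; omega)]
      ring
    · subst hs
      rw [whoWinsWhile]
      rw [if_neg (by simp)]
      simp only [forA_remove j a b t hb 0 0 c (by omega)]
      have hlen : (List.replicate (j + 1) a ++ b :: t).length =
          (List.replicate j a ++ t).length + 2 := by simp; omega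
      rw [ih (List.replicate j a ++ t) (c + 1) (by simp at h hlen ⊢; omega)]
      rw [remCount_step j a b t hb, hlen]
      by_cases hp : 2 * remCount (List.replicate j a ++ t) = (List.replicate j a ++ t).length
      · rw [if_pos hp, if_pos (by omega)]
        push_cast
        ring
      · rw [if_neg hp, if_neg (by omega)]
        push_cast
        ring

-- ===== VERDICT (by name: the statement is the Claim_ definition above) =====
theorem who_wins_spec : Claim_equal_who_wins := by
  intro p _
  unfold Spec_who_wins who_wins who_wins_alt
  rw [whileA_eq (p.toList.length + 2) p.toList 1 (by omega)]
  have hm : ∀ a : Int, PySem.Int.mod a 2 = a % 2 := fun a =>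
    PySem.Int.mod_eq_emod_of_pos (by norm_num)
  simp only [hm]
  show _ = if remCount p.toList % 2 = 1 then "DA" else "NET"
  by_cases hp : 2 * remCount p.toList = p.toList.length <;>
    simp only [hp, if_pos, if_neg, not_false_iff] <;>
    split_ifs with h1 h2 <;> first | rfl | (exfalso; omega)
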